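-- pv_equiv track=rewrite | github.com/06sri/finetuning | Evaluation/zeroshotqa/qa_infer.py | generate_equal_distribution
-- ===== SOURCE A (Python) =====
-- def generate_equal_distribution(N, M):
--     if M > N:
--         raise ValueError("M should be lower than N")
--
--     result = []
--     count = N // M  # 각 숫자별로 반복되는 횟수
--
--     for i in range(1, M+1):
--         result.extend([i] * count)
--
--     # 나머지 N % M 만큼 남는 부분을 처리
--     remainder = N % M
--     for i in range(1, remainder+1):
--         result.append(i)
--
--     return result
-- ===== SOURCE B (Python) =====
-- def generate_equal_distribution(N, M):
--     if M > N:
--         raise ValueError("M should be lower than N")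
--     step = N // M  # ZeroDivisionError for M == 0, as in A
--     # build the answer back-to-front: the remainder values descending, then a
--     # countdown state machine emitting each value `step` times from M down to 1
--     rev = list(range(N % M, 0, -1))
--     v, left = M, step
--     while v >= 1:
--         rev.append(v)
--         left -= 1
--         if left == 0:
--             v, left = v - 1, step
--     rev.reverse()
--     return rev
-- ===== Notes on version B (the rewrite author's own statement) =====
-- stated objective: alternative
-- what changed: Instead of A's two staged block-building loops (extend [i]*count per label, then append the remainder range), B builds the output back-to-front: the remainder values descending, then a countdown state machine (current value, copies left) emitting one element per iteration, with a single final reverse.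
import Mathlib
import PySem

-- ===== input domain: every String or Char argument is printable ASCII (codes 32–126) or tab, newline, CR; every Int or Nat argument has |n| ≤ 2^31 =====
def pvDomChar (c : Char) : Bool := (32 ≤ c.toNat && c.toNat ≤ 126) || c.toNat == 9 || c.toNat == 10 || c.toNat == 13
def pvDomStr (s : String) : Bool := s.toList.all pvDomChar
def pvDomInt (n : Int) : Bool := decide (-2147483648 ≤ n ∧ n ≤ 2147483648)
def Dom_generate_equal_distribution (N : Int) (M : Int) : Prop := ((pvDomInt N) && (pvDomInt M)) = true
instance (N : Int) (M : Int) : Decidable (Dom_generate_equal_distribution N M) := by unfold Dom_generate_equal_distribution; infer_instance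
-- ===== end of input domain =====

-- B builds the list back-to-front with a countdown state machine and one final reverse,
-- instead of A's staged block-extends plus remainder loop; same asymptotic cost.

-- ===== PORT A =====
def generate_equal_distribution (N : Int) (M : Int) : List Int :=
  if M > N then []  -- Python raises ValueError here; excluded by Pre_
  else
    let count := PySem.Int.floordiv N M
    let result := (PySem.List.pyRange 1 (M+1) 1).foldl
      (fun acc i => acc ++ PySem.List.pyRepeat [i] count) []
    let remainder := PySem.Int.mod N M
    result ++ PySem.List.pyRange 1 (remainder+1) 1

-- ===== PORT B =====
-- the while loop of Source B; fuel only makes it total (the loop runs at most (M*step).toNat times)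
def pvBLoop (step : Int) : Nat → Int → Int → List Int → List Int
  | 0, _, _, acc => acc
  | fuel+1, v, left, acc =>
    if 1 ≤ v then
      if left - 1 = 0 then pvBLoop step fuel (v-1) step (acc ++ [v])
      else pvBLoop step fuel v (left-1) (acc ++ [v])
    else acc

def generate_equal_distribution_alt (N : Int) (M : Int) : List Int :=
  if M > N then []  -- Python raises ValueError here; excluded by Pre_
  else
    let step := PySem.Int.floordiv N M
    let rev := PySem.List.pyRange (PySem.Int.mod N M) 0 (-1)
    (pvBLoop step ((M * step).toNat + 1) M step rev).reverse

-- ===== PRECONDITION & SPEC =====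
-- Pre_ excludes exactly the inputs where Python A raises: M > N (ValueError) and M = 0 (ZeroDivisionError).
def Pre_generate_equal_distribution (N : Int) (M : Int) : Prop := M ≠ 0 ∧ M ≤ N
instance (N : Int) (M : Int) : Decidable (Pre_generate_equal_distribution N M) := by unfold Pre_generate_equal_distribution; infer_instance
def pvWitness_generate_equal_distribution : Int × Int := (7, 3)

def Spec_generate_equal_distribution (N : Int) (M : Int) (out : List Int) : Prop := out = generate_equal_distribution_alt N M
instance (N : Int) (M : Int) (out : List Int) : Decidable (Spec_generate_equal_distribution N M out) := by unfold Spec_generate_equal_distribution; infer_instance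

-- ===== CLAIM =====
def Claim_equal_generate_equal_distribution : Prop := ∀ (N : Int) (M : Int), Dom_generate_equal_distribution N M → Pre_generate_equal_distribution N M → Spec_generate_equal_distribution N M (generate_equal_distribution N M)

-- ===== LEMMAS AND PROOFS =====

-- descending block concatenation: D c n = [n]*c ++ [n-1]*c ++ … ++ [1]*c
def pvDesc (c : Int) : Nat → List Int
  | 0 => []
  | n+1 => List.replicate c.toNat ((n : Int)+1) ++ pvDesc c n

-- ascending block concatenation: the value A's first loop builds
def pvAsc (c : Int) : Nat → List Int
  | 0 => []
  | n+1 => pvAsc c n ++ List.replicate c.toNat ((n : Int)+1)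

lemma pvDesc_reverse (c : Int) : ∀ n, (pvDesc c n).reverse = pvAsc c n := by
  intro n
  induction n with
  | zero => simp [pvDesc, pvAsc]
  | succ k ih => simp [pvDesc, pvAsc, List.reverse_append, ih]

-- consuming one block of the state machine
lemma pvBLoop_block (step v : Int) (hv : 1 ≤ v) : ∀ (l : Nat) (fuel : Nat) (acc : List Int),
    1 ≤ l → l ≤ fuel →
    pvBLoop step fuel v (l : Int) acc
      = pvBLoop step (fuel - l) (v-1) step (acc ++ List.replicate l v) := by
  intro l
  induction l with
  | zero => omega
  | succ k ih =>
    intro fuel acc h1 h2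
    obtain ⟨f, rfl⟩ : ∃ f, fuel = f + 1 := ⟨fuel - 1, by omega⟩
    by_cases hk : k = 0
    · subst hk
      simp only [pvBLoop, if_pos hv]
      norm_num
    · have hk1 : (1:Int) ≤ (k : Int) := by exact_mod_cast Nat.one_le_iff_ne_zero.mpr hk
      simp only [pvBLoop, if_pos hv]
      push_cast
      have hne : ((k : Int) + 1) - 1 ≠ 0 := by omega
      rw [if_neg hne]
      have : ((k : Int) + 1) - 1 = (k : Int) := by ring
      rw [this, ih f (acc ++ [v]) (by omega) (by omega)]
      have hrep : acc ++ [v] ++ List.replicate k v = acc ++ List.replicate (k+1) v := by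
        simp [List.replicate_succ, List.append_assoc]
      rw [hrep]

-- the full state machine produces the descending blocks
lemma pvBLoop_spec (step : Int) (hs : 1 ≤ step) : ∀ (n : Nat) (fuel : Nat) (acc : List Int),
    n * step.toNat ≤ fuel →
    pvBLoop step fuel (n : Int) step acc = acc ++ pvDesc step n := by
  intro n
  induction n with
  | zero =>
    intro fuel acc _
    cases fuel with
    | zero => simp [pvBLoop, pvDesc]
    | succ f => simp [pvBLoop, pvDesc]
  | succ k ih =>
    intro fuel acc hf
    have hst : ((step.toNat : Int)) = step := by omega
    have hv : (1:Int) ≤ ((k:Nat) : Int) + 1 := by omega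
    have hfuel : (k+1) * step.toNat ≤ fuel := hf
    have hsn : 1 ≤ step.toNat := by omega
    have hmul : (k+1) * step.toNat = k * step.toNat + step.toNat := by ring
    have := pvBLoop_block step ((k : Int)+1) hv step.toNat fuel acc hsn (by omega)
    rw [hst] at this
    push_cast
    rw [this]
    have h2 : ((k : Int) + 1) - 1 = (k : Int) := by ring
    rw [h2, ih (fuel - step.toNat) _ (by omega)]
    simp [pvDesc, List.append_assoc]

-- A's extend loop builds the ascending blocks
lemma pvAloop_spec (c : Int) : ∀ (m : Nat),
    (PySem.List.pyRange 1 ((m : Int)+1) 1).foldl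
        (fun acc i => acc ++ PySem.List.pyRepeat [i] c) []
      = pvAsc c m := by
  intro m
  induction m with
  | zero => simp [PySem.List.pyRange_one_eq_nil, pvAsc]
  | succ n ih =>
    have h1 : (1 : Int) ≤ (n : Int) + 1 := by omega
    have hstep : PySem.List.pyRange 1 ((n : Int) + 1 + 1) 1
        = PySem.List.pyRange 1 ((n : Int) + 1) 1 ++ [(n : Int) + 1] :=
      PySem.List.pyRange_one_succ_right h1
    push_cast
    rw [hstep, List.foldl_append, ih]
    simp [pvAsc, PySem.List.pyRepeat_singleton]

-- ===== VERDICT =====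
theorem generate_equal_distribution_spec : Claim_equal_generate_equal_distribution := by
  intro N M hdom hpre
  obtain ⟨h1, h2⟩ := hpre
  unfold Spec_generate_equal_distribution generate_equal_distribution generate_equal_distribution_alt
  have hng : ¬ (M > N) := by omega
  simp only [if_neg hng]
  rcases lt_or_gt_of_ne h1 with hMneg | hMpos
  · -- M < 0: both sides are empty
    have hb1 : PySem.List.pyRange 1 (M+1) 1 = [] := PySem.List.pyRange_one_eq_nil (by omega)
    have hmod := PySem.Int.mod_neg_bounds (a := N) (b := M) hMneg
    have hb2 : PySem.List.pyRange 1 (PySem.Int.mod N M + 1) 1 = [] :=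
      PySem.List.pyRange_one_eq_nil (by omega)
    have hrev : PySem.List.pyRange (PySem.Int.mod N M) 0 (-1) = [] :=
      PySem.List.pyRange_neg_one_eq_nil (by omega)
    rw [hb1, hb2, hrev]
    simp only [List.foldl_nil, List.nil_append]
    cases hfe : (M * PySem.Int.floordiv N M).toNat + 1 with
    | zero => simp [pvBLoop]
    | succ f => simp [pvBLoop, if_neg (by omega : ¬ (1:Int) ≤ M)]
  · -- 1 ≤ M ≤ N
    have hc : 0 < PySem.Int.floordiv N M := by
      have := (PySem.Int.le_floordiv_iff_mul_le (a := N) (b := M) (q := 1) (by omega)).mpr (by omega)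
      omega
    set c := PySem.Int.floordiv N M with hcdef
    have hmod0 : 0 ≤ PySem.Int.mod N M := PySem.Int.mod_nonneg _ (by omega)
    have hrev : PySem.List.pyRange (PySem.Int.mod N M) 0 (-1)
        = (PySem.List.pyRange 1 (PySem.Int.mod N M + 1) 1).reverse := by
      rw [PySem.List.pyRange_neg_one_eq_reverse]; norm_num
    have hM : M = ((M.toNat : Int)) := by omega
    have hloop := pvBLoop_spec c hc M.toNat ((M * c).toNat + 1)
      (PySem.List.pyRange (PySem.Int.mod N M) 0 (-1))
      (by
        have : ((M.toNat * c.toNat : Nat) : Int) = M * c := by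
          push_cast; rw [← hM]; congr 1; omega
        omega)
    rw [← hM] at hloop
    rw [hloop, hrev, List.reverse_append, List.reverse_reverse, pvDesc_reverse]
    have hA : (PySem.List.pyRange 1 (M+1) 1).foldl
        (fun acc i => acc ++ PySem.List.pyRepeat [i] c) [] = pvAsc c M.toNat := by
      conv_lhs => rw [hM]
      exact pvAloop_spec c M.toNat
    rw [hA]
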